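-- pv_equiv track=rewrite | github.com/heheheheehhejie/Code_wbbb | wbbb_code.py | ctw
-- ===== SOURCE A (Python) =====
-- def ctw(ch):
--     ret=""
--     for i in range(8):
--         if ord(ch)&(1<<i):
--             ret+="比歪"
--         else:
--             ret+="卜巴"
--     return ret[::-1]
-- ===== SOURCE B (Python) =====
-- def ctw(ch):
--     # Build the 8-bit pattern bit7..bit0 up front, then map each bit to its
--     # (pre-reversed) two-char token; no bit-shift loop, no final reversal.
--     bits = format(ord(ch) & 0xFF, '08b')
--     return ''.join('歪比' if b == '1' else '巴卜' for b in bits)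
-- ===== Notes on version B (the rewrite author's own statement) =====
-- stated objective: idiomatic
-- what changed: B builds the full 8-bit binary string up front with the format builtin and maps each bit character to a pre-reversed token, replacing A's explicit shift-and-accumulate loop followed by whole-string reversal.
import Mathlib
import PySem

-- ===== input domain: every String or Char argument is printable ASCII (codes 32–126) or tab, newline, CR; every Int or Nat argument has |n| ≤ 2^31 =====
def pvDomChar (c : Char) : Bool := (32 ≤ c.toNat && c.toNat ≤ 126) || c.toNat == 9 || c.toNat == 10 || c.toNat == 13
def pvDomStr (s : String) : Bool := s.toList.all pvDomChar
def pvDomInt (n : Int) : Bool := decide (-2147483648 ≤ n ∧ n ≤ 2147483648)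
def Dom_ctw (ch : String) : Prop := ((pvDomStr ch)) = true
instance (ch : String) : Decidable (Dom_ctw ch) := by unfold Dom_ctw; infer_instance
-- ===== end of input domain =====

-- B builds the 8-bit pattern first and maps pre-reversed tokens over it, instead of
-- A's shift-and-accumulate loop followed by a whole-string reversal (objective: idiomatic).

-- ===== PORT A =====
-- the loop body over ret : List Char (the string ret, as chars); "比歪"/"卜巴" written as their characters
def ctwLoop (n : Nat) : List Char :=
  (PySem.List.pyRange 0 8 1).foldl
    (fun ret i => ret ++ (if n &&& (1 <<< i.toNat) ≠ 0 then ['比', '歪'] else ['卜', '巴'])) []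

def ctw (ch : String) : String :=
  match ch.toList with
  | [c] => String.ofList (ctwLoop c.toNat).reverse   -- ret[::-1] (exact: s[::-1] reverses the chars)
  | _ => ""   -- ord(ch) raises TypeError here; excluded by Pre_ctw

-- ===== PORT B =====
-- format(n, '08b') for n < 256: chars of bit7..bit0, each (n >> i) & 1
def ctwBits (n : Nat) : List Char :=
  (List.range 8).reverse.map (fun i => if (n >>> i) &&& 1 = 1 then '1' else '0')

def ctw_alt (ch : String) : String :=
  match ch.toList with
  | [] => ""   -- ord(ch) raises TypeError here; excluded by Pre_ctw
  | _ :: _ :: _ => ""   -- ord(ch) raises TypeError here; excluded by Pre_ctw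
  | [c] =>
    let n := c.toNat % 256   -- ord(ch) & 0xFF
    -- ''.join('歪比' if b == '1' else '巴卜' for b in bits)
    String.ofList (((ctwBits n).map (fun b => if b = '1' then ['歪', '比'] else ['巴', '卜'])).flatten)

-- ===== PRECONDITION & SPEC =====
-- Pre_: Python's ord(ch) raises TypeError unless ch is a single character.
def Pre_ctw (ch : String) : Prop := ch.toList.length = 1
instance (ch : String) : Decidable (Pre_ctw ch) := by unfold Pre_ctw; infer_instance
def pvWitness_ctw : String := "A"

def Spec_ctw (ch : String) (out : String) : Prop := out = ctw_alt ch
instance (ch : String) (out : String) : Decidable (Spec_ctw ch out) := by unfold Spec_ctw; infer_instance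

-- ===== CLAIM (what is proved, stated in full; the proofs are below) =====
def Claim_equal_ctw : Prop := ∀ (ch : String), Dom_ctw ch → Pre_ctw ch → Spec_ctw ch (ctw ch)

-- ===== LEMMAS AND PROOFS =====

-- A's bit test equals B's bit test, for bit positions below 8
theorem bitTest_eq (n i : Nat) (hi : i < 8) :
    (n &&& (1 <<< i) ≠ 0) = (((n % 256) >>> i) &&& 1 = 1) := by
  have h1 : (n &&& (1 <<< i) ≠ 0) = n.testBit i := by
    rw [Nat.one_shiftLeft, Nat.and_two_pow]
    cases h : n.testBit i <;> simp
  have h2 : (((n % 256) >>> i) &&& 1 = 1) = (n % 256).testBit i := by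
    rw [Nat.and_one_is_mod]
    simp [Nat.testBit_eq_decide_div_mod_eq, Nat.shiftRight_eq_div_pow]
  have h3 : (n % 256).testBit i = n.testBit i := by
    have h : (256 : Nat) = 2 ^ 8 := by norm_num
    rw [h, Nat.testBit_mod_two_pow]
    simp [hi]
  rw [h1, h2, h3]

-- reversing an appending fold reverses each appended block and their order
theorem foldl_append_reverse (f : Int → List Char) (l : List Int) (acc : List Char) :
    (l.foldl (fun r i => r ++ f i) acc).reverse
      = (l.reverse.map (fun i => (f i).reverse)).flatten ++ acc.reverse := by
  induction l generalizing acc with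
  | nil => simp
  | cons i l ih =>
    simp [List.foldl_cons, List.reverse_flatten, List.map_map]
    rfl

-- core identity: the reversed loop output is B's token concatenation
theorem core_eq (n : Nat) :
    (ctwLoop n).reverse =
      ((ctwBits (n % 256)).map (fun b => if b = '1' then ['歪', '比'] else ['巴', '卜'])).flatten := by
  have hr : PySem.List.pyRange 0 8 1 = [0, 1, 2, 3, 4, 5, 6, 7] := by decide
  unfold ctwLoop ctwBits
  rw [hr, foldl_append_reverse]
  simp only [List.map, List.reverse, List.reverseAux, List.range, List.range.loop,
    List.append_nil, Int.toNat]
  simp only [bitTest_eq n 0 (by norm_num), bitTest_eq n 1 (by norm_num),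
    bitTest_eq n 2 (by norm_num), bitTest_eq n 3 (by norm_num), bitTest_eq n 4 (by norm_num),
    bitTest_eq n 5 (by norm_num), bitTest_eq n 6 (by norm_num), bitTest_eq n 7 (by norm_num)]
  norm_num [apply_ite List.reverse, apply_ite (fun b => if b = '1' then ['歪', '比'] else ['巴', '卜']),
    (show ¬ (('0' : Char) = '1') by decide), Nat.mod_two_ne_zero]

-- ===== VERDICT (by name: the statement is the Claim_ definition above) =====
theorem ctw_spec : Claim_equal_ctw := by
  intro ch _ hpre
  unfold Spec_ctw ctw ctw_alt
  unfold Pre_ctw at hpre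
  match hl : ch.toList with
  | [c] => simp only [core_eq]
  | [] => simp [hl] at hpre
  | _ :: _ :: _ => simp [hl] at hpre
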